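-- pv_equiv track=rewrite | github.com/marcus-grant/advent-of-code | 2024/07/solve.py | dp_recurse_memo
-- ===== SOURCE A (Python) =====
-- import functools
-- from typing import Union, List, Optional, Dict  # , Tuple, Dict, Literal, NewType
--
-- def dp_recurse_memo(target: int, nums: List[int], idx: int, current: int) -> List[str]:
--     """
--     Memoized recursive function to find all sequences of '+' and '*' operations
--     that transform the list of numbers into the target value.
--     """
--
--     @functools.lru_cache(maxsize=None)
--     def recurse(idx: int, current: int) -> tuple:
--         # Base case: All numbers have been processed
--         if idx == len(nums):
--             if current == target:
--                 return ("",)  # Return a tuple with an empty string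
--             else:
--                 return ()  # Return an empty tuple indicating no valid sequence
--
--         num_next = nums[idx]
--         sequences = []
--
--         # Possibility 1: Addition
--         result_add = recurse(idx + 1, current + num_next)
--         for seq in result_add:
--             sequences.append("+" + seq)
--
--         # Possibility 2: Multiplication
--         result_mul = recurse(idx + 1, current * num_next)
--         for seq in result_mul:
--             sequences.append("*" + seq)
--
--         # Possibility 3: Concatenation
--         result_mul = recurse(idx + 1, int(str(current) + str(num_next)))
--         for seq in result_mul:
--             sequences.append("|" + seq)
--
--         return tuple(sequences)  # Convert list to tuple for caching
--
--     # Initiate recursion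
--     return list(recurse(idx, current))
-- ===== SOURCE B (Python) =====
-- def dp_recurse_memo(target, nums, idx, current):
--     # Iterative breadth-first expansion of (value, ops-string) states over nums[idx:],
--     # then a single filter at the end; no recursion, no cache.
--     frontier = [(current, "")]
--     for n in nums[idx:]:
--         nxt = []
--         for v, s in frontier:
--             nxt.append((v + n, s + "+"))
--             nxt.append((v * n, s + "*"))
--             nxt.append((int(str(v) + str(n)), s + "|"))
--         frontier = nxt
--     return [s for v, s in frontier if v == target]
-- ===== Notes on version B (the rewrite author's own statement) =====
-- stated objective: alternative
-- what changed: Replaces the memoized prefix recursion with an iterative breadth-first expansion of a frontier of (value, ops-string) states over nums[idx:], filtering by value == target once at the end.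
-- outside the precondition, e.g. on dp_recurse_memo(4, [2, 2], -1, 0): A returns ['*++', '*+*', '*|+', '*|*'], B returns []
import Mathlib
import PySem

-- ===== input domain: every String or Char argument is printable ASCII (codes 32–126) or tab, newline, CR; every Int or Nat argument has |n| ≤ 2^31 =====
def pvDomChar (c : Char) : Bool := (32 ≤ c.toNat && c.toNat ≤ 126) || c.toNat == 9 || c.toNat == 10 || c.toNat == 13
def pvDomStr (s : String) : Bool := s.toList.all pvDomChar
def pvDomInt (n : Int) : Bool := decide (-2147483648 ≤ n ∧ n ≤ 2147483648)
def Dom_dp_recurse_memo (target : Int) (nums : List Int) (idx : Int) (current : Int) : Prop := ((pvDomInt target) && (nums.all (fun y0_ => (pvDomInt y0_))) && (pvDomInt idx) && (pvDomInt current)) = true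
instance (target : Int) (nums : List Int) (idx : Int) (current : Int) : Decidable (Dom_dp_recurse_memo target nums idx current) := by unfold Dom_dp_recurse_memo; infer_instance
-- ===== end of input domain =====

-- B replaces A's memoized prefix recursion by an iterative breadth-first frontier of
-- (value, ops-string) states with one final filter (objective: alternative, same exponential cost).


-- Shared helper: int(str(v) + str(n)) as both Pythons compute it; exact via PySem.Int.ofChars?/toChars.
-- The .getD 0 is reached only when int(...) would raise ValueError (n < 0), which Pre_ excludes.
def pyConcat (v n : Int) : Int :=
  (PySem.Int.ofChars? (PySem.Int.toChars v ++ PySem.Int.toChars n)).getD 0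

-- ===== PORT A =====
-- A's inner `recurse`, on the suffix nums[idx:]: base case idx == len(nums) is the empty suffix,
-- nums[idx] is the head. (The lru_cache only speeds A up; it does not change the returned value.)
def dpRecA (target : Int) : List Int → Int → List String
  | [], current => if current = target then [""] else []
  | n :: rest, current =>
      ((dpRecA target rest (current + n)).map (fun seq => "+" ++ seq)) ++
      ((dpRecA target rest (current * n)).map (fun seq => "*" ++ seq)) ++
      ((dpRecA target rest (pyConcat current n)).map (fun seq => "|" ++ seq))

-- Guard only makes the recursion total: outside 0 ≤ idx ≤ len(nums) the Python A wraps a negative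
-- index or hits RecursionError; Pre_ excludes exactly those inputs, so nothing is claimed there.
def dp_recurse_memo (target : Int) (nums : List Int) (idx : Int) (current : Int) : List String :=
  if 0 ≤ idx ∧ idx ≤ nums.length then dpRecA target (nums.drop idx.toNat) current else []

-- ===== PORT B =====
def dp_recurse_memo_alt (target : Int) (nums : List Int) (idx : Int) (current : Int) : List String :=
  let rest := PySem.List.slice nums (some idx) none   -- nums[idx:]
  let frontier := rest.foldl
    (fun fr n => fr.flatMap (fun p =>
      [(p.1 + n, p.2 ++ "+"), (p.1 * n, p.2 ++ "*"), (pyConcat p.1 n, p.2 ++ "|")]))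
    [(current, "")]
  frontier.filterMap (fun p => if p.1 = target then some p.2 else none)

-- ===== PRECONDITION & SPEC =====
-- Pre_ excludes: negative idx (A's value arises from Python's negative-index wraparound, outside the
-- caller's natural domain idx ∈ [0, len]); idx > len(nums) (A raises RecursionError); and a negative
-- number in nums[idx:] (A raises ValueError, since int(str(v) + str(n)) sees an inner '-').
def Pre_dp_recurse_memo (target : Int) (nums : List Int) (idx : Int) (current : Int) : Prop :=
  0 ≤ idx ∧ idx ≤ nums.length ∧ ∀ x ∈ nums.drop idx.toNat, 0 ≤ x
instance (target : Int) (nums : List Int) (idx : Int) (current : Int) : Decidable (Pre_dp_recurse_memo target nums idx current) := by unfold Pre_dp_recurse_memo; infer_instance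
def pvWitness_dp_recurse_memo : Int × List Int × Int × Int := (4, [1, 2], 0, 0)

def Spec_dp_recurse_memo (target : Int) (nums : List Int) (idx : Int) (current : Int) (out : List String) : Prop := out = dp_recurse_memo_alt target nums idx current
instance (target : Int) (nums : List Int) (idx : Int) (current : Int) (out : List String) : Decidable (Spec_dp_recurse_memo target nums idx current out) := by unfold Spec_dp_recurse_memo; infer_instance

-- ===== CLAIM (what is proved, stated in full; the proofs are below) =====
def Claim_equal_dp_recurse_memo : Prop := ∀ (target : Int) (nums : List Int) (idx : Int) (current : Int), Dom_dp_recurse_memo target nums idx current → Pre_dp_recurse_memo target nums idx current → Spec_dp_recurse_memo target nums idx current (dp_recurse_memo target nums idx current)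

-- ===== LEMMAS AND PROOFS =====

-- Final filter of a frontier = flatMap of the per-state tails of A's recursion.
theorem frontier_filter_eq (target : Int) (rest : List Int) (fr : List (Int × String)) :
    (rest.foldl
        (fun fr n => fr.flatMap (fun p =>
          [(p.1 + n, p.2 ++ "+"), (p.1 * n, p.2 ++ "*"), (pyConcat p.1 n, p.2 ++ "|")]))
        fr).filterMap (fun p => if p.1 = target then some p.2 else none)
      = fr.flatMap (fun p => (dpRecA target rest p.1).map (fun t => p.2 ++ t)) := by
  induction rest generalizing fr with
  | nil =>
      simp only [List.foldl_nil, dpRecA]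
      induction fr with
      | nil => simp
      | cons p fr ih =>
          simp only [List.filterMap_cons, List.flatMap_cons, ← ih]
          by_cases h : p.1 = target <;> simp [h]
  | cons n rs ih =>
      simp only [List.foldl_cons, ih, List.flatMap_assoc]
      refine List.flatMap_congr ?_
      intro p _
      simp [dpRecA, List.map_map, Function.comp_def, String.append_assoc]

-- ===== VERDICT (by name: the statement is the Claim_ definition above) =====
theorem dp_recurse_memo_spec : Claim_equal_dp_recurse_memo := by
  intro target nums idx current _ hpre
  obtain ⟨h0, hle, _⟩ := hpre
  unfold Spec_dp_recurse_memo dp_recurse_memo dp_recurse_memo_alt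
  rw [if_pos ⟨h0, hle⟩, PySem.List.slice_from nums h0, frontier_filter_eq]
  simp
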